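-- pv_equiv track=rewrite | github.com/StuartRiffle/new-math | canon.py | get_prime_ring_cycles
-- ===== SOURCE A (Python) =====
-- def get_prime_ring_cycles(p):
--
--     fixed = (p - 1) // 2
--     index = {fixed: 0}
--
--     idx = 1
--     n = 0
--     while len(index.keys()) < p:
--         if n in index:
--             idx += 1
--             n = 1
--             while n in index:
--                 n += 1
--             # set n to the lowest value not yet in cycle_index
--
--         index[n] = idx
--         n = (3 * n + 1) % p
--
--     return index
-- ===== SOURCE B (Python) =====
-- def get_prime_ring_cycles(p):
--     fixed = (p - 1) // 2
--     index = {fixed: 0}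
--     idx = 0
--     for start in range(p):
--         if start in index:
--             continue
--         idx += 1
--         n = start
--         while n not in index:
--             index[n] = idx
--             n = (3 * n + 1) % p
--     return index
-- ===== Notes on version B (the rewrite author's own statement) =====
-- stated objective: faster
-- what changed: A restarts a linear scan from 1 after every closed orbit to find the lowest unassigned residue (O(p) per cycle); B instead sweeps the starts 0..p-1 once with a for loop, skipping visited residues and chasing each fresh orbit inline, so each residue is examined O(1) times.
-- intended difference: For p = 2 (the only p whose fixed point (p-1)//2 is 0, A's initial probe), A's leftover initial n = 0 collides with the fixed point and bumps the cycle counter before any cycle is assigned, returning {0: 0, 1: 2} with label 1 skipped; B returns the contiguous labelling {0: 0, 1: 1}, which is the intended consecutive cycle indexing. — e.g. on get_prime_ring_cycles(2): A returns [(0, 0), (1, 2)], B returns [(0, 0), (1, 1)]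
import Mathlib
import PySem

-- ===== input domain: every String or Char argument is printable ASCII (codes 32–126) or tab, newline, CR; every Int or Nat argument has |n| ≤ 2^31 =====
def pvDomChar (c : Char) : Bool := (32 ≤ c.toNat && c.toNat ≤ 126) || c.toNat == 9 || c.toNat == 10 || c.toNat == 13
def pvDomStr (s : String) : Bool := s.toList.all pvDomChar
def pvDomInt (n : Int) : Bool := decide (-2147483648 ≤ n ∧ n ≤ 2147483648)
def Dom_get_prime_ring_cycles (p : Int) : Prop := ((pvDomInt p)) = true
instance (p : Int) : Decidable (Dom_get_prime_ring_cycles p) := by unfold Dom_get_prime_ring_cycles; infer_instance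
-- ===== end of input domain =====

-- B replaces A's restart-the-scan-from-1 search for the lowest unassigned residue by a
-- single for-loop sweep over the starts 0..p-1 (objective: faster, one pass over the residues).


-- ===== PORT A =====
-- inner scan `n = 1; while n in index: n += 1`; the fuel argument only makes the
-- recursion structural (at every call site it is provably more than the number of scanned keys)
def pvScanA (d : PySem.Dict Int Int) : Int → Nat → Int
  | n, 0 => n
  | n, fuel+1 => if d.contains n then pvScanA d (n + 1) fuel else n

-- the outer `while len(index.keys()) < p` loop; each iteration inserts one fresh key,
-- so fuel p.toNat (set at the call site, with the initial dict of size 1) is provably sufficient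
def pvLoopA (p : Int) : Nat → PySem.Dict Int Int → Int → Int → PySem.Dict Int Int
  | 0, d, _idx, _n => d
  | fuel+1, d, idx, n =>
    if ((d.keys.length : Int) < p) then
      if d.contains n then
        let idx' := idx + 1
        let n' := pvScanA d 1 (d.keys.length + 1)
        pvLoopA p fuel (d.insert n' idx') idx' (PySem.Int.mod (3 * n' + 1) p)
      else
        pvLoopA p fuel (d.insert n idx) idx (PySem.Int.mod (3 * n + 1) p)
    else d

def get_prime_ring_cycles (p : Int) : List (Int × Int) :=
  let fixed := PySem.Int.floordiv (p - 1) 2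
  let index := (PySem.Dict.empty : PySem.Dict Int Int).insert fixed 0
  (pvLoopA p p.toNat index 1 0).items

-- ===== PORT B =====
-- the inner `while n not in index` orbit chase; fuel p.toNat is provably sufficient
-- (each step inserts a fresh residue of [0, p))
def pvChainB (p : Int) : Nat → PySem.Dict Int Int → Int → Int → PySem.Dict Int Int
  | 0, d, _idx, _n => d
  | fuel+1, d, idx, n =>
    if d.contains n then d
    else pvChainB p fuel (d.insert n idx) idx (PySem.Int.mod (3 * n + 1) p)

-- the `for start in range(p)` sweep
def pvForB (p : Int) : List Int → PySem.Dict Int Int → Int → PySem.Dict Int Int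
  | [], d, _idx => d
  | s :: rest, d, idx =>
    if d.contains s then pvForB p rest d idx
    else pvForB p rest (pvChainB p p.toNat d (idx + 1) s) (idx + 1)

def get_prime_ring_cycles_alt (p : Int) : List (Int × Int) :=
  let fixed := PySem.Int.floordiv (p - 1) 2
  let index := (PySem.Dict.empty : PySem.Dict Int Int).insert fixed 0
  (pvForB p (PySem.List.pyRange 0 p 1) index 0).items

-- ===== PRECONDITION & SPEC =====
-- For p = 2, A's leftover initial probe n = 0 collides with the fixed point (p-1)//2 = 0 and
-- bumps the cycle counter before any cycle is assigned, so A returns {0: 0, 1: 2} with label 1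
-- skipped; B returns the contiguous labelling {0: 0, 1: 1}, the intended consecutive indexing.
def D_get_prime_ring_cycles (p : Int) : Prop := p = 2
instance (p : Int) : Decidable (D_get_prime_ring_cycles p) := by unfold D_get_prime_ring_cycles; infer_instance

def Spec_get_prime_ring_cycles (p : Int) (out : List (Int × Int)) : Prop := ¬ D_get_prime_ring_cycles p → out = get_prime_ring_cycles_alt p
instance (p : Int) (out : List (Int × Int)) : Decidable (Spec_get_prime_ring_cycles p out) := by unfold Spec_get_prime_ring_cycles; infer_instance

def pvDiffWitness_get_prime_ring_cycles : Int := 2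
def pvDiffWitnessOut_get_prime_ring_cycles : (List (Int × Int)) × (List (Int × Int)) := ([(0, 0), (1, 2)], [(0, 0), (1, 1)])

-- ===== CLAIM (what is proved, stated in full; the proofs are below) =====
def Claim_unchanged_get_prime_ring_cycles : Prop := ∀ (p : Int), Dom_get_prime_ring_cycles p → Spec_get_prime_ring_cycles p (get_prime_ring_cycles p)
def Claim_changed_get_prime_ring_cycles : Prop := Dom_get_prime_ring_cycles (pvDiffWitness_get_prime_ring_cycles) ∧ D_get_prime_ring_cycles (pvDiffWitness_get_prime_ring_cycles) ∧ get_prime_ring_cycles (pvDiffWitness_get_prime_ring_cycles) = pvDiffWitnessOut_get_prime_ring_cycles.1 ∧ get_prime_ring_cycles_alt (pvDiffWitness_get_prime_ring_cycles) = pvDiffWitnessOut_get_prime_ring_cycles.2 ∧ pvDiffWitnessOut_get_prime_ring_cycles.1 ≠ pvDiffWitnessOut_get_prime_ring_cycles.2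
def Claim_exact_get_prime_ring_cycles : Prop := ∀ (p : Int), Dom_get_prime_ring_cycles p → D_get_prime_ring_cycles p → get_prime_ring_cycles p ≠ get_prime_ring_cycles_alt p

-- ===== LEMMAS AND PROOFS =====

-- keys invariant: all keys lie in [0, p) and are distinct
def pvInv (p : Int) (d : PySem.Dict Int Int) : Prop :=
  (∀ k ∈ d.keys, 0 ≤ k ∧ k < p) ∧ d.keys.Nodup

-- countP of (s+1 ≤ ·) drops strictly below countP of (s ≤ ·) when s occurs
lemma pv_countP_lt (l : List Int) (s : Int) (h : s ∈ l) :
    l.countP (fun k => decide (s + 1 ≤ k)) < l.countP (fun k => decide (s ≤ k)) := by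
  induction l with
  | nil => cases h
  | cons a t ih =>
    simp only [List.countP_cons]
    rcases List.mem_cons.mp h with rfl | ha
    · have hmono : t.countP (fun k => decide (s + 1 ≤ k)) ≤ t.countP (fun k => decide (s ≤ k)) :=
        List.countP_mono_left (by intro x _ hx; simp only [decide_eq_true_eq] at hx ⊢; omega)
      simp only [decide_eq_true_eq]
      split_ifs <;> omega
    · have h1 := ih ha
      have h2 : (if (decide (s + 1 ≤ a)) = true then 1 else 0) ≤ (if (decide (s ≤ a)) = true then 1 else 0) := by
        simp only [decide_eq_true_eq]; split_ifs <;> omega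
      omega

-- scan specification: with enough fuel, pvScanA returns the least unused integer ≥ start
lemma pvScanA_spec (d : PySem.Dict Int Int) : ∀ (fuel : Nat) (start : Int),
    d.keys.countP (fun k => decide (start ≤ k)) < fuel →
    d.contains (pvScanA d start fuel) = false ∧ start ≤ pvScanA d start fuel ∧
      (∀ k, start ≤ k → k < pvScanA d start fuel → k ∈ d.keys) := by
  intro fuel
  induction fuel with
  | zero => intro start h; omega
  | succ fuel ih =>
    intro start h
    by_cases hc : d.contains start = true
    · have hmem : start ∈ d.keys := (PySem.Dict.contains_iff_mem_keys d start).mp hc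
      have hlt := pv_countP_lt d.keys start hmem
      have hspec := ih (start + 1) (by omega)
      rw [pvScanA, if_pos hc]
      refine ⟨hspec.1, by have := hspec.2.1; omega, ?_⟩
      intro k hk1 hk2
      rcases eq_or_lt_of_le hk1 with rfl | hlt'
      · exact hmem
      · exact hspec.2.2 k (by omega) hk2
    · rw [pvScanA, if_neg (by simpa using hc)]
      exact ⟨by simpa using hc, le_refl _, by intro k h1 h2; omega⟩

lemma pv_keys_subperm (p : Int) (d : PySem.Dict Int Int) (hinv : pvInv p d) :
    d.keys.Subperm (PySem.List.pyRange 0 p 1) := by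
  refine List.subperm_of_subset hinv.2 ?_
  intro k hk
  have := hinv.1 k hk
  exact PySem.List.mem_pyRange_one.mpr ⟨this.1, this.2⟩

-- pigeonhole: a full dict contains every residue
lemma pv_full (p : Int) (d : PySem.Dict Int Int) (hinv : pvInv p d)
    (hsz : p ≤ (d.keys.length : Int)) : ∀ k : Int, 0 ≤ k → k < p → k ∈ d.keys := by
  intro k hk1 hk2
  have hperm : d.keys.Perm (PySem.List.pyRange 0 p 1) := by
    refine (pv_keys_subperm p d hinv).perm_of_length_le ?_
    rw [PySem.List.length_pyRange_one]
    omega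
  exact hperm.symm.subset (PySem.List.mem_pyRange_one.mpr ⟨hk1, hk2⟩)

-- pigeonhole: a non-full dict misses some residue
lemma pv_unused (p : Int) (d : PySem.Dict Int Int) (_hinv : pvInv p d)
    (hsz : (d.keys.length : Int) < p) : ∃ u : Int, 0 ≤ u ∧ u < p ∧ u ∉ d.keys := by
  by_contra hcon
  push Not at hcon
  have hsub : (PySem.List.pyRange 0 p 1).Subperm d.keys := by
    refine List.subperm_of_subset (PySem.List.nodup_pyRange_one 0 p) ?_
    intro k hk
    have := PySem.List.mem_pyRange_one.mp hk
    exact hcon k this.1 this.2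
  have := hsub.length_le
  rw [PySem.List.length_pyRange_one] at this
  omega

-- inserting a fresh residue keeps the dict strictly smaller than full beforehand
lemma pv_size_lt (p : Int) (d : PySem.Dict Int Int) (hinv : pvInv p d) (m : Int)
    (hmk : m ∉ d.keys) (hm0 : 0 ≤ m) (hmp : m < p) : (d.keys.length : Int) < p := by
  have hsub : (d.keys ++ [m]).Subperm (PySem.List.pyRange 0 p 1) := by
    refine List.subperm_of_subset ?_ ?_
    · simpa [List.nodup_append] using ⟨hinv.2, fun a ha h => hmk (h ▸ ha)⟩
    · intro k hk
      rcases List.mem_append.mp hk with hk | hk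
      · have := hinv.1 k hk
        exact PySem.List.mem_pyRange_one.mpr ⟨this.1, this.2⟩
      · simp only [List.mem_singleton] at hk
        subst hk
        exact PySem.List.mem_pyRange_one.mpr ⟨hm0, hmp⟩
  have := hsub.length_le
  rw [PySem.List.length_pyRange_one] at this
  simp only [List.length_append, List.length_singleton] at this
  omega

-- a sweep over already-visited starts is a no-op
lemma pvForB_visited (p : Int) (l1 : List Int) : ∀ (l2 : List Int) (d : PySem.Dict Int Int) (idx : Int),
    (∀ k ∈ l1, k ∈ d.keys) → pvForB p (l1 ++ l2) d idx = pvForB p l2 d idx := by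
  induction l1 with
  | nil => intro l2 d idx _; rw [List.nil_append]
  | cons a t ih =>
    intro l2 d idx h
    rw [List.cons_append, pvForB,
      if_pos ((PySem.Dict.contains_iff_mem_keys d a).mpr (h a List.mem_cons_self))]
    exact ih l2 d idx (fun k hk => h k (List.mem_cons_of_mem a hk))

-- an orbit chase started on a visited residue is a no-op
lemma pvChainB_mem (p : Int) (F : Nat) (d : PySem.Dict Int Int) (idx m : Int)
    (h : d.contains m = true) : pvChainB p F d idx m = d := by
  cases F with
  | zero => rw [pvChainB]
  | succ F => rw [pvChainB, if_pos h]

-- on a full dict both loops are over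
lemma pv_done (p : Int) (d : PySem.Dict Int Int) (idx s : Int) (hinv : pvInv p d)
    (hs : 1 ≤ s) (hsz : p ≤ (d.keys.length : Int)) :
    pvForB p (PySem.List.pyRange s p 1) d idx = d := by
  have h := pvForB_visited p (PySem.List.pyRange s p 1) [] d idx (by
    intro k hk
    have := PySem.List.mem_pyRange_one.mp hk
    exact pv_full p d hinv hsz k (by omega) this.2)
  rw [List.append_nil] at h
  rw [h, pvForB]

-- the main simulation: A's flat loop equals B's sweep-plus-chase, by induction on fuel
lemma pv_sim (p : Int) (hp : 2 ≤ p) : ∀ fuel : Nat,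
    (∀ (d : PySem.Dict Int Int) (idx n s : Int), pvInv p d → d.contains n = true → 1 ≤ s →
      (∀ k : Int, 0 ≤ k → k < s → k ∈ d.keys) → p ≤ (d.keys.length : Int) + fuel →
      pvLoopA p fuel d idx n = pvForB p (PySem.List.pyRange s p 1) d idx) ∧
    (∀ (d : PySem.Dict Int Int) (idx m s : Int) (F : Nat), pvInv p d → 0 ≤ m → m < p → 1 ≤ s →
      (∀ k : Int, 0 ≤ k → k < s → k ∈ d.keys) → p ≤ (d.keys.length : Int) + fuel →
      p ≤ (d.keys.length : Int) + F →
      pvLoopA p fuel d idx m = pvForB p (PySem.List.pyRange s p 1) (pvChainB p F d idx m) idx) := by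
  intro fuel
  induction fuel with
  | zero =>
    constructor
    · intro d idx n s hinv _hn hs _hbelow hsz
      rw [pvLoopA, pv_done p d idx s hinv hs (by push_cast at hsz ⊢; omega)]
    · intro d idx m s F hinv hm0 hmp hs _hbelow hsz _hszF
      have hsz' : p ≤ (d.keys.length : Int) := by push_cast at hsz ⊢; omega
      rw [pvLoopA, pvChainB_mem p F d idx m
        ((PySem.Dict.contains_iff_mem_keys d m).mpr (pv_full p d hinv hsz' m hm0 hmp)),
        pv_done p d idx s hinv hs hsz']
  | succ fuel ih =>
    have hP : ∀ (d : PySem.Dict Int Int) (idx n s : Int), pvInv p d → d.contains n = true → 1 ≤ s →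
        (∀ k : Int, 0 ≤ k → k < s → k ∈ d.keys) → p ≤ (d.keys.length : Int) + (fuel + 1) →
        pvLoopA p (fuel + 1) d idx n = pvForB p (PySem.List.pyRange s p 1) d idx := by
      intro d idx n s hinv hn hs hbelow hsz
      by_cases hlt : (d.keys.length : Int) < p
      · rw [pvLoopA, if_pos hlt, if_pos hn]
        have hscan := pvScanA_spec d (d.keys.length + 1) 1
          (lt_of_le_of_lt List.countP_le_length (Nat.lt_succ_self _))
        set n' := pvScanA d 1 (d.keys.length + 1) with hn'
        obtain ⟨hn'c, hn'1, hn'min⟩ := hscan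
        have hn'k : n' ∉ d.keys := fun hmem => by
          simp [(PySem.Dict.contains_iff_mem_keys d n').mpr hmem] at hn'c
        obtain ⟨u, hu0, hup, huk⟩ := pv_unused p d hinv hlt
        have hu1 : 1 ≤ u := by
          rcases eq_or_lt_of_le hu0 with rfl | h
          · exact absurd (hbelow 0 le_rfl (by omega)) huk
          · omega
        have hn'p : n' < p := by
          by_contra hcon
          exact huk (hn'min u hu1 (by omega))
        have hsn' : s ≤ n' := by
          by_contra hcon
          exact hn'k (hbelow n' (by omega) (by omega))
        have hkeys' := PySem.Dict.keys_insert_of_not_contains d (idx + 1) hn'c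
        have hinv' : pvInv p (d.insert n' (idx + 1)) := by
          constructor
          · intro k hk
            rcases (PySem.Dict.mem_keys_insert d n' k (idx + 1)).mp hk with rfl | hk
            · omega
            · exact hinv.1 k hk
          · exact PySem.Dict.nodup_keys_insert d n' (idx + 1) hinv.2
        have hlen' : ((d.insert n' (idx + 1)).keys.length : Int) = (d.keys.length : Int) + 1 := by
          rw [hkeys']; simp only [List.length_append, List.length_cons, List.length_nil]; push_cast; omega
        -- B side: skip the visited starts s, …, n'-1, then chase the orbit of n'
        rw [PySem.List.pyRange_one_append s n' p hsn' (le_of_lt hn'p),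
          pvForB_visited p _ _ d idx (by
            intro k hk
            have := PySem.List.mem_pyRange_one.mp hk
            exact hn'min k (by omega) this.2),
          PySem.List.pyRange_one_cons hn'p, pvForB, if_neg (by rw [hn'c]; simp)]
        have hfuel : p.toNat = (p.toNat - 1) + 1 := by omega
        rw [hfuel, pvChainB, if_neg (by rw [hn'c]; simp)]
        exact ih.2 (d.insert n' (idx + 1)) (idx + 1) (PySem.Int.mod (3 * n' + 1) p) (n' + 1)
          (p.toNat - 1) hinv'
          (PySem.Int.mod_nonneg _ (by omega)) (PySem.Int.mod_lt _ (by omega)) (by omega)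
          (by
            intro k hk0 hks
            rcases lt_or_ge k n' with hkn | hkn
            · rcases lt_or_ge k s with hks' | hks'
              · exact (PySem.Dict.mem_keys_insert d n' k (idx + 1)).mpr (Or.inr (hbelow k hk0 hks'))
              · exact (PySem.Dict.mem_keys_insert d n' k (idx + 1)).mpr
                  (Or.inr (hn'min k (by omega) hkn))
            · have : k = n' := by omega
              exact (PySem.Dict.mem_keys_insert d n' k (idx + 1)).mpr (Or.inl this))
          (by rw [hlen']; omega)
          (by rw [hlen']; omega)
      · rw [pvLoopA, if_neg hlt, pv_done p d idx s hinv hs (by omega)]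
    refine ⟨hP, ?_⟩
    intro d idx m s F hinv hm0 hmp hs hbelow hsz hszF
    by_cases hc : d.contains m = true
    · rw [pvChainB_mem p F d idx m hc]
      exact hP d idx m s hinv hc hs hbelow hsz
    · have hc' : d.contains m = false := by
        cases h : d.contains m
        · rfl
        · exact absurd h hc
      have hmk : m ∉ d.keys := fun hmem =>
        hc ((PySem.Dict.contains_iff_mem_keys d m).mpr hmem)
      have hlt : (d.keys.length : Int) < p := pv_size_lt p d hinv m hmk hm0 hmp
      have hF : F = (F - 1) + 1 := by omega
      rw [hF, pvChainB, if_neg hc, pvLoopA, if_pos hlt, if_neg hc]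
      have hkeys' := PySem.Dict.keys_insert_of_not_contains d idx hc'
      have hlen' : ((d.insert m idx).keys.length : Int) = (d.keys.length : Int) + 1 := by
        rw [hkeys']; simp only [List.length_append, List.length_cons, List.length_nil]; push_cast; omega
      exact ih.2 (d.insert m idx) idx (PySem.Int.mod (3 * m + 1) p) s (F - 1)
        (⟨by
          intro k hk
          rcases (PySem.Dict.mem_keys_insert d m k idx).mp hk with rfl | hk
          · omega
          · exact hinv.1 k hk,
          PySem.Dict.nodup_keys_insert d m idx hinv.2⟩)
        (PySem.Int.mod_nonneg _ (by omega)) (PySem.Int.mod_lt _ (by omega)) hs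
        (fun k hk0 hks => (PySem.Dict.mem_keys_insert d m k idx).mpr (Or.inr (hbelow k hk0 hks)))
        (by rw [hlen']; push_cast at hsz ⊢; omega)
        (by rw [hlen']; omega)

-- ===== VERDICT (by name: the statement is the Claim_ definition above) =====
theorem get_prime_ring_cycles_spec : Claim_unchanged_get_prime_ring_cycles := by
  intro p _hdom
  unfold Spec_get_prime_ring_cycles D_get_prime_ring_cycles
  intro hD
  rcases lt_or_ge p 1 with hp | hp
  · -- p ≤ 0: both loops exit immediately
    simp only [get_prime_ring_cycles, get_prime_ring_cycles_alt]
    rw [show p.toNat = 0 from by omega, PySem.List.pyRange_one_eq_nil (by omega : p ≤ 0),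
      pvLoopA, pvForB]
  · rcases eq_or_lt_of_le hp with h1 | hp2
    · -- p = 1
      subst h1; decide
    · -- 3 ≤ p (p = 2 is the D_ region)
      have hp3 : 3 ≤ p := by omega
      simp only [get_prime_ring_cycles, get_prime_ring_cycles_alt]
      set fx := PySem.Int.floordiv (p - 1) 2 with hfx
      have hfxb : 1 ≤ fx ∧ fx < p := by
        rw [hfx, PySem.Int.floordiv_eq_ediv_of_pos (by norm_num)]
        omega
      have hk1 : ((PySem.Dict.empty : PySem.Dict Int Int).insert fx 0).keys = [fx] := by
        rw [PySem.Dict.keys_insert_of_not_contains _ _ (PySem.Dict.contains_empty fx)]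
        rw [PySem.Dict.keys_empty, List.nil_append]
      set d1 := (PySem.Dict.empty : PySem.Dict Int Int).insert fx 0 with hd1
      have h0k : (0 : Int) ∉ d1.keys := by rw [hk1]; simp; omega
      have hc0 : d1.contains 0 = false := by
        cases h : d1.contains 0
        · rfl
        · exact absurd ((PySem.Dict.contains_iff_mem_keys d1 0).mp h) h0k
      have hmod1 : PySem.Int.mod (3 * 0 + 1) p = 1 := by
        rw [show (3 * (0 : Int) + 1) = 1 from by norm_num,
          PySem.Int.mod_eq_emod_of_pos (by omega : (0 : Int) < p)]
        exact Int.emod_eq_of_lt (by norm_num) (by omega)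
      have hk2 : (d1.insert 0 1).keys = [fx, 0] := by
        rw [PySem.Dict.keys_insert_of_not_contains d1 1 hc0, hk1]; rfl
      set d2 := d1.insert 0 1 with hd2
      have hinv2 : pvInv p d2 := by
        constructor
        · intro k hk
          rw [hk2] at hk
          rcases List.mem_cons.mp hk with rfl | hk
          · omega
          · simp only [List.mem_singleton] at hk; omega
        · rw [hk2]
          refine List.nodup_cons.mpr ⟨?_, List.nodup_singleton 0⟩
          simp; omega
      have hlen2 : ((d2.keys.length : Int)) = 2 := by rw [hk2]; rfl
      -- A: unfold the first iteration (n = 0 is fresh, gets cycle index 1)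
      rw [show p.toNat = (p.toNat - 1) + 1 from by omega, pvLoopA,
        if_pos (by rw [hk1]; simpa using by omega : ((d1.keys.length : Int) < p)),
        if_neg (by rw [hc0]; simp), hmod1]
      -- B: unfold the first sweep step (start 0 is fresh) and the first chase step
      rw [PySem.List.pyRange_one_cons (by omega : (0 : Int) < p), pvForB,
        if_neg (by rw [hc0]; simp),
        show p.toNat = (p.toNat - 1) + 1 from by omega, pvChainB,
        if_neg (by rw [hc0]; simp), hmod1,
        show (0 : Int) + 1 = 1 from by norm_num]
      exact congrArg PySem.Dict.items
        (((pv_sim p (by omega)) (p.toNat - 1)).2 d2 1 1 1 (p.toNat - 1) hinv2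
          (by norm_num) (by omega) le_rfl
          (by intro k hk0 hks
              have : k = 0 := by omega
              subst this
              rw [hk2]; simp)
          (by rw [hlen2]; omega) (by rw [hlen2]; omega))

theorem get_prime_ring_cycles_changed : Claim_changed_get_prime_ring_cycles := by
  unfold Claim_changed_get_prime_ring_cycles; decide

theorem get_prime_ring_cycles_tight : Claim_exact_get_prime_ring_cycles := by
  intro p _ hD
  unfold D_get_prime_ring_cycles at hD
  subst hD
  decide
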